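-- pv_equiv track=rewrite | github.com/rczwisler/wispChallenge | wisp_api/special_math.py | special_math_memoize
-- ===== SOURCE A (Python) =====
-- def special_math_memoize(value, memoize = None):
--     '''
--     Recursive special math solver with memoization
--
--     Parameters:
--         value(int): Input value to evaluate
--         memoize(dict): Dictionary of previously calculated values
--
--     Returns:
--         result(int): Result of special math f(n) = n + f(n-1) + f(n-2)
--     '''
--     if memoize is None:
--         memoize = {}
--     if value in memoize:
--         return memoize[value]
--     if value == 0:
--         return value
--     if value == 1:
--         return value
--     result = value + special_math_memoize(value-1, memoize) + special_math_memoize(value-2, memoize)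
--     memoize[value] = result
--     return result
-- ===== SOURCE B (Python) =====
-- def special_math_memoize(value, memoize=None):
--     """Iterative bottom-up re-implementation of f(n) = n + f(n-1) + f(n-2),
--     honouring entries of the supplied memo dict (checked before the base cases,
--     exactly as A's recursion does). Return value only: A mutates `memoize`
--     in place, B leaves it untouched."""
--     memo = memoize if memoize is not None else {}
--     if value in memo:
--         return memo[value]
--     if value <= 1:
--         return value
--     prev2 = memo.get(0, 0)
--     prev1 = memo.get(1, 1)
--     for k in range(2, value + 1):
--         cur = memo.get(k)
--         if cur is None:
--             cur = k + prev1 + prev2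
--         prev2, prev1 = prev1, cur
--     return prev1
-- ===== Notes on version B (the rewrite author's own statement) =====
-- stated objective: alternative
-- what changed: Replaces A's top-down memoized recursion (with dict mutation) by a bottom-up loop over two rolling values that consults the supplied memo dict at each level; B does not mutate the caller's memoize dict.
-- outside the precondition, e.g. on special_math_memoize(-1, {-2: 5, -3: 7}): A returns 11, B returns -1
import Mathlib
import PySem

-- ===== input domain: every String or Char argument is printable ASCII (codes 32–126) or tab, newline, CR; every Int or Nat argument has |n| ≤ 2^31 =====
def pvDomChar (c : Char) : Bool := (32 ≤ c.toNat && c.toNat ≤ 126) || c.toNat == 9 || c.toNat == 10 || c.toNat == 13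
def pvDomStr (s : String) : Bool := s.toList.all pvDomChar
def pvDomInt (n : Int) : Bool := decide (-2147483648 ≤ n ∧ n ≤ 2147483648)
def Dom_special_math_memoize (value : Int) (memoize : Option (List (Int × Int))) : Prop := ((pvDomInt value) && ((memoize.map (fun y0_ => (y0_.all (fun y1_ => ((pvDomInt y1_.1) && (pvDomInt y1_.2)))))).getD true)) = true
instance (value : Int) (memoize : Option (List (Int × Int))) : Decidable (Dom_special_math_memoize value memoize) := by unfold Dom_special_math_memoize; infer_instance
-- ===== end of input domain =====

-- B replaces A's top-down memoized recursion by a bottom-up loop over two rolling values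
-- (memo entries still consulted before the base cases and at every level, as in A).
-- Equivalence is about the RETURN value only: A mutates the caller's memo dict in place, B does not.

-- ===== PORT A =====
-- A's recursion on `value`, the memo dict threaded through; a Nat fuel makes the
-- recursion structural (value.toNat + 1 suffices on Pre_; outside Pre_ A does not return,
-- so the fuel-out value is never claimed).
def pvAgo : Nat → Int → PySem.Dict Int Int → Int × PySem.Dict Int Int
  | 0, _, memo => (0, memo)
  | fuel+1, value, memo =>
    match PySem.Dict.get? memo value with
    | some r => (r, memo)
    | none =>
      if value = 0 then (value, memo)
      else if value = 1 then (value, memo)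
      else
        let p1 := pvAgo fuel (value - 1) memo
        let p2 := pvAgo fuel (value - 2) p1.2
        let result := value + p1.1 + p2.1
        (result, PySem.Dict.insert p2.2 value result)

def special_math_memoize (value : Int) (memoize : Option (List (Int × Int))) : Int :=
  let memo : PySem.Dict Int Int := PySem.Dict.mk (memoize.getD [])
  (pvAgo (value.toNat + 1) value memo).1

-- ===== PORT B =====
-- loop body: (prev2, prev1) -> (prev1, cur), cur = memo.get(k) or k + prev1 + prev2
def pvBstep (memo : PySem.Dict Int Int) (st : Int × Int) (k : Int) : Int × Int :=
  (st.2, match PySem.Dict.get? memo k with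
         | some c => c
         | none => k + st.2 + st.1)

def special_math_memoize_alt (value : Int) (memoize : Option (List (Int × Int))) : Int :=
  let memo : PySem.Dict Int Int := PySem.Dict.mk (memoize.getD [])
  match PySem.Dict.get? memo value with
  | some r => r
  | none =>
    if value ≤ 1 then value
    else
      ((PySem.List.pyRange 2 (value + 1) 1).foldl (pvBstep memo)
        (PySem.Dict.getD memo 0 0, PySem.Dict.getD memo 1 1)).2

-- ===== PRECONDITION & SPEC =====
-- Pre_ excludes (a) negative values absent from the memo dict — there A's recursion finds no
-- base case and (except for accidental chains of consecutive memo hits, cited in the claim)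
-- raises RecursionError, while B just returns `value` — and (b) memo association lists with
-- duplicate keys, which represent no Python dict (Python keeps the last value per key, the
-- association-list reading the first).
def Pre_special_math_memoize (value : Int) (memoize : Option (List (Int × Int))) : Prop :=
  (0 ≤ value ∨ value ∈ (memoize.getD []).map Prod.fst) ∧
  ((memoize.getD []).map Prod.fst).Nodup
instance (value : Int) (memoize : Option (List (Int × Int))) : Decidable (Pre_special_math_memoize value memoize) := by unfold Pre_special_math_memoize; infer_instance

def pvWitness_special_math_memoize : Int × (Option (List (Int × Int))) := (6, some [(3, 10)])

def Spec_special_math_memoize (value : Int) (memoize : Option (List (Int × Int))) (out : Int) : Prop := out = special_math_memoize_alt value memoize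
instance (value : Int) (memoize : Option (List (Int × Int))) (out : Int) : Decidable (Spec_special_math_memoize value memoize out) := by unfold Spec_special_math_memoize; infer_instance

-- ===== CLAIM (what is proved, stated in full; the proofs are below) =====
def Claim_equal_special_math_memoize : Prop := ∀ (value : Int) (memoize : Option (List (Int × Int))), Dom_special_math_memoize value memoize → Pre_special_math_memoize value memoize → Spec_special_math_memoize value memoize (special_math_memoize value memoize)

-- ===== LEMMAS AND PROOFS =====

-- the pure recurrence over the ORIGINAL memo dict: g(k) = memo[k] if present, else k for k<2,
-- else k + g(k-1) + g(k-2); both ports compute g(value)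
def pvG (memo : PySem.Dict Int Int) : Nat → Int
  | 0 => (PySem.Dict.get? memo 0).getD 0
  | 1 => (PySem.Dict.get? memo 1).getD 1
  | n+2 =>
    match PySem.Dict.get? memo ((n : Int) + 2) with
    | some v => v
    | none => ((n : Int) + 2) + pvG memo (n+1) + pvG memo n

lemma pvG_of_mem (memo : PySem.Dict Int Int) (n : Nat) (v : Int)
    (h : PySem.Dict.get? memo (n : Int) = some v) : pvG memo n = v := by
  match n with
  | 0 => simp [pvG]; simp only [Nat.cast_zero] at h; simp [h]
  | 1 => simp [pvG]; simp only [Nat.cast_one] at h; simp [h]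
  | n+2 =>
    have h' : PySem.Dict.get? memo ((n : Int) + 2) = some v := by
      have : ((n + 2 : Nat) : Int) = (n : Int) + 2 := by push_cast; ring
      rwa [this] at h
    simp [pvG, h']

-- invariant of A's memo during the recursion: every nonnegative key reads either as in the
-- original dict or as the recurrence value
def pvInv (memo0 memo : PySem.Dict Int Int) : Prop :=
  ∀ k : Int, 0 ≤ k →
    PySem.Dict.get? memo k = PySem.Dict.get? memo0 k ∨
    PySem.Dict.get? memo k = some (pvG memo0 k.toNat)

lemma pvInv_refl (memo0 : PySem.Dict Int Int) : pvInv memo0 memo0 := fun _ _ => Or.inl rfl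

lemma pvAgo_correct (memo0 : PySem.Dict Int Int) :
    ∀ (fuel : Nat) (value : Int) (memo : PySem.Dict Int Int),
      0 ≤ value → value.toNat < fuel → pvInv memo0 memo →
      (pvAgo fuel value memo).1 = pvG memo0 value.toNat ∧
      pvInv memo0 (pvAgo fuel value memo).2 := by
  intro fuel
  induction fuel with
  | zero => intro value memo _ hf _; omega
  | succ f ih =>
    intro value memo hv _hf hinv
    rcases hmem : PySem.Dict.get? memo value with _ | r
    · -- not in memo
      have hmem0 : PySem.Dict.get? memo0 value = none := by
        rcases hinv value hv with h | h
        · rw [← h]; exact hmem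
        · rw [hmem] at h; cases h
      by_cases h0 : value = 0
      · subst h0
        refine ⟨?_, by simp [pvAgo, hmem]; exact hinv⟩
        simp [pvAgo, hmem, pvG, hmem0]
      by_cases h1 : value = 1
      · subst h1
        refine ⟨?_, by simp [pvAgo, hmem]; exact hinv⟩
        simp [pvAgo, hmem, pvG, hmem0]
      · -- value ≥ 2
        have hv2 : 2 ≤ value := by omega
        have hr1 := ih (value - 1) memo (by omega) (by omega) hinv
        have hr2 := ih (value - 2) (pvAgo f (value - 1) memo).2 (by omega) (by omega) hr1.2
        -- the value of the recurrence at `value`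
        obtain ⟨m, hm⟩ : ∃ m : Nat, value = (m : Int) + 2 :=
          ⟨(value - 2).toNat, by omega⟩
        have ht : value.toNat = m + 2 := by omega
        have ht1 : (value - 1).toNat = m + 1 := by omega
        have ht2 : (value - 2).toNat = m := by omega
        have hG : pvG memo0 value.toNat =
            value + pvG memo0 (value - 1).toNat + pvG memo0 (value - 2).toNat := by
          rw [ht, ht1, ht2]
          have hmem0' : PySem.Dict.get? memo0 ((m : Int) + 2) = none := by rwa [hm] at hmem0
          simp [pvG, hmem0', hm]
        have hres : (pvAgo (f+1) value memo).1 = pvG memo0 value.toNat ∧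
            (pvAgo (f+1) value memo).2 =
              PySem.Dict.insert (pvAgo f (value - 2) (pvAgo f (value - 1) memo).2).2 value
                (pvG memo0 value.toNat) := by
          constructor
          · simp only [pvAgo, hmem, h0, h1, if_false]
            rw [hr1.1, hr2.1, hG]
          · simp only [pvAgo, hmem, h0, h1, if_false]
            rw [hr1.1, hr2.1, hG]
        refine ⟨hres.1, ?_⟩
        rw [hres.2]
        intro k hk
        by_cases hkv : k = value
        · subst hkv
          right
          rw [PySem.Dict.get?_insert_self]
        · rw [PySem.Dict.get?_insert_of_ne _ _ hkv]
          exact hr2.2 k hk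
    · -- memo hit: return it
      have : pvG memo0 value.toNat = r := by
        rcases hinv value hv with h | h
        · refine pvG_of_mem memo0 value.toNat r ?_
          rw [Int.toNat_of_nonneg hv, ← h, hmem]
        · rw [hmem] at h
          exact (Option.some_inj.mp h).symm
      constructor
      · simp [pvAgo, hmem, this]
      · simp [pvAgo, hmem]; exact hinv

-- B's rolling-pair loop computes consecutive recurrence values
lemma pvBloop (memo : PySem.Dict Int Int) :
    ∀ n : Nat,
      (PySem.List.pyRange 2 ((n : Int) + 2) 1).foldl (pvBstep memo)
        (PySem.Dict.getD memo 0 0, PySem.Dict.getD memo 1 1) =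
      (pvG memo n, pvG memo (n+1)) := by
  intro n
  induction n with
  | zero =>
    have h0 : PySem.List.pyRange 2 (((0:Nat):Int) + 2) 1 = [] :=
      PySem.List.pyRange_one_eq_nil (by norm_num)
    rw [h0]
    simp [pvG, PySem.Dict.getD_eq_get?_getD]
  | succ n ih =>
    have hsplit : PySem.List.pyRange 2 ((n : Int) + 1 + 2) 1 =
        PySem.List.pyRange 2 ((n : Int) + 2) 1 ++ [(n : Int) + 2] := by
      have := PySem.List.pyRange_one_succ_right (a := 2) (b := (n : Int) + 2) (by omega)
      simpa using this
    have hc : ((n + 1 : Nat) : Int) + 2 = (n : Int) + 1 + 2 := by push_cast; ring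
    rw [hc, hsplit, List.foldl_append, ih]
    show pvBstep memo (pvG memo n, pvG memo (n+1)) ((n : Int) + 2) = _
    rfl

-- ===== VERDICT (by name: the statement is the Claim_ definition above) =====
theorem special_math_memoize_spec : Claim_equal_special_math_memoize := by
  intro value memoize _dom hpre
  unfold Spec_special_math_memoize special_math_memoize special_math_memoize_alt
  set memo : PySem.Dict Int Int := PySem.Dict.mk (memoize.getD []) with hmemo
  rcases hget : PySem.Dict.get? memo value with _ | r
  · -- not in memo: Pre_ forces 0 ≤ value
    have hv : 0 ≤ value := by
      rcases hpre.1 with h | h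
      · exact h
      · exfalso
        have : value ∈ PySem.Dict.keys memo := by
          simpa [PySem.Dict.keys, hmemo] using h
        rw [PySem.Dict.get?_eq_none_iff_not_mem_keys] at hget
        exact hget this
    by_cases h0 : value = 0
    · subst h0; simp [pvAgo, hget]
    by_cases h1 : value = 1
    · subst h1; simp [pvAgo, hget]
    · have hv2 : 2 ≤ value := by omega
      have hA := pvAgo_correct memo (value.toNat + 1) value memo hv (by omega) (pvInv_refl memo)
      rw [hA.1]
      have hle : ¬ value ≤ 1 := by omega
      simp only [hget, hle, if_false]
      obtain ⟨m, hm1⟩ : ∃ m : Nat, value = (m : Int) + 2 :=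
        ⟨(value - 2).toNat, by omega⟩
      have hrange : value + 1 = ((m + 1 : Nat) : Int) + 2 := by push_cast; omega
      rw [hrange, pvBloop memo (m + 1)]
      have : value.toNat = m + 1 + 1 := by omega
      rw [this]
  · -- memo hit in both programs
    simp [pvAgo, hget]
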